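-- pv_equiv track=rewrite | github.com/asfrosche/SplitDumb | backend/app/domain/expense_service.py | calculate_equal_splits
-- ===== SOURCE A (Python) =====
-- from typing import List, Dict
--
-- def calculate_equal_splits(
--     amount_cents: int, participant_ids: List[int]
-- ) -> List[Dict[str, int]]:
--     """
--     Calculate equal splits for participants.
--     Returns list of {user_id, amount_cents} dicts.
--     """
--     if not participant_ids:
--         raise ValueError("At least one participant required")
--
--     per_person_cents = amount_cents // len(participant_ids)
--     remainder = amount_cents % len(participant_ids)
--
--     splits = []
--     for i, user_id in enumerate(participant_ids):
--         # Distribute remainder to first N participants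
--         amount = per_person_cents + (1 if i < remainder else 0)
--         splits.append({"user_id": user_id, "amount_cents": amount})
--
--     return splits
-- ===== SOURCE B (Python) =====
-- from typing import List, Dict
--
-- def calculate_equal_splits(
--     amount_cents: int, participant_ids: List[int]
-- ) -> List[Dict[str, int]]:
--     """
--     Calculate equal splits for participants.
--     Returns list of {user_id, amount_cents} dicts.
--     """
--     if not participant_ids:
--         raise ValueError("At least one participant required")
--
--     # Greedy distribution: each participant in turn takes the ceiling share
--     # of what is still undistributed among those still waiting.
--     splits = []
--     remaining = amount_cents
--     left = len(participant_ids)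
--     for user_id in participant_ids:
--         share = -((-remaining) // left)
--         splits.append({"user_id": user_id, "amount_cents": share})
--         remaining -= share
--         left -= 1
--     return splits
-- ===== Notes on version B (the rewrite author's own statement) =====
-- stated objective: alternative
-- what changed: Replaces A's precomputed base/remainder pair and the index-based `i < remainder` branch by a greedy loop with shrinking state: each participant takes the ceiling share of the still-undistributed amount among those still waiting (no remainder variable, no index, no branch).
import Mathlib
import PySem

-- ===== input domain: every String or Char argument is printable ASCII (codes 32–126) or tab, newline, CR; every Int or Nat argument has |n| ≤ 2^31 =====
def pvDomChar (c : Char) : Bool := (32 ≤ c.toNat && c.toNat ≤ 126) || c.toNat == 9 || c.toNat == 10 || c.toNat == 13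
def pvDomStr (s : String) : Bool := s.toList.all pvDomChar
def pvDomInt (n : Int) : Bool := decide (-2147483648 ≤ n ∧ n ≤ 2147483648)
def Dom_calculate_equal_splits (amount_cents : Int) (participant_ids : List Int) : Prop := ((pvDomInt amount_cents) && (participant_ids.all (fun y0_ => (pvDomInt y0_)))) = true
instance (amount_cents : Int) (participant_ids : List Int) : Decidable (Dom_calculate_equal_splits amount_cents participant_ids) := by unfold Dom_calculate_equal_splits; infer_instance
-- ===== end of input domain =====

-- B replaces A's base/remainder precomputation and `i < remainder` branch by a greedy
-- recursion: each head takes the ceiling share of the remaining amount; same O(n) cost.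
-- Both programs raise ValueError on an empty participant list; Pre_ excludes it.


-- ===== PORT A =====
def calculate_equal_splits (amount_cents : Int) (participant_ids : List Int) : List (List (String × Int)) :=
  if participant_ids = [] then []  -- Python raises ValueError here; excluded by Pre_
  else
    let per_person_cents := PySem.Int.floordiv amount_cents (participant_ids.length : Int)
    let remainder := PySem.Int.mod amount_cents (participant_ids.length : Int)
    (PySem.List.enumerate participant_ids).foldl
      (fun splits p =>
        splits ++ [[("user_id", p.2),
                    ("amount_cents", per_person_cents + (if p.1 < remainder then 1 else 0))]])
      []

-- ===== PORT B =====
-- B's loop over participant_ids carrying (splits, remaining, left).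
def calculate_equal_splits_alt (amount_cents : Int) (participant_ids : List Int) : List (List (String × Int)) :=
  if participant_ids = [] then []  -- Python raises ValueError here; excluded by Pre_
  else
    (participant_ids.foldl
      (fun (st : List (List (String × Int)) × Int × Int) user_id =>
        let share := -(PySem.Int.floordiv (-st.2.1) st.2.2)
        (st.1 ++ [[("user_id", user_id), ("amount_cents", share)]],
         st.2.1 - share, st.2.2 - 1))
      ([], amount_cents, (participant_ids.length : Int))).1

-- ===== PRECONDITION & SPEC =====
-- Pre_ excludes the empty participant list, on which both A and B raise ValueError.
def Pre_calculate_equal_splits (amount_cents : Int) (participant_ids : List Int) : Prop :=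
  participant_ids ≠ []
instance (amount_cents : Int) (participant_ids : List Int) : Decidable (Pre_calculate_equal_splits amount_cents participant_ids) := by unfold Pre_calculate_equal_splits; infer_instance
def pvWitness_calculate_equal_splits : Int × List Int := (7, [10, 11, 12])
def Spec_calculate_equal_splits (amount_cents : Int) (participant_ids : List Int) (out : List (List (String × Int))) : Prop := out = calculate_equal_splits_alt amount_cents participant_ids
instance (amount_cents : Int) (participant_ids : List Int) (out : List (List (String × Int))) : Decidable (Spec_calculate_equal_splits amount_cents participant_ids out) := by unfold Spec_calculate_equal_splits; infer_instance

-- ===== CLAIM (what is proved, stated in full; the proofs are below) =====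
def Claim_equal_calculate_equal_splits : Prop := ∀ (amount_cents : Int) (participant_ids : List Int), Dom_calculate_equal_splits amount_cents participant_ids → Pre_calculate_equal_splits amount_cents participant_ids → Spec_calculate_equal_splits amount_cents participant_ids (calculate_equal_splits amount_cents participant_ids)

-- ===== LEMMAS AND PROOFS =====

-- Common reference shape: entry for each id at running index i, amount per + (1 if i < rem).
def pvMk (per rem i : Int) : List Int → List (List (String × Int))
  | [] => []
  | x :: rest =>
      [("user_id", x), ("amount_cents", per + (if i < rem then 1 else 0))] :: pvMk per rem (i + 1) rest

-- A's foldl-append loop is the map of its body over the list.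
theorem pv_foldl_append_map {α β : Type} (f : α → β) (l : List α) (acc : List β) :
    l.foldl (fun s x => s ++ [f x]) acc = acc ++ l.map f := by
  induction l generalizing acc with
  | nil => simp
  | cons x xs ih => simp [List.foldl, ih]

-- A's mapped enumerate is pvMk.
theorem pv_A_mk (per rem : Int) (ids : List Int) : ∀ s : Int,
    (PySem.List.enumerate ids s).map
      (fun p => [("user_id", p.2), ("amount_cents", per + (if p.1 < rem then 1 else 0))])
      = pvMk per rem s ids := by
  induction ids with
  | nil => intro s; simp [PySem.List.enumerate_nil, pvMk]
  | cons x rest ih => intro s; simp [PySem.List.enumerate_cons, pvMk, ih]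

-- Shifting the start index by one is the same as lowering rem by one.
theorem pv_mk_shift (per rem i : Int) (l : List Int) :
    pvMk per rem (i + 1) l = pvMk per (rem - 1) i l := by
  induction l generalizing i with
  | nil => rfl
  | cons x rest ih =>
      simp only [pvMk, ih]
      congr 2
      have : i + 1 < rem ↔ i < rem - 1 := by omega
      simp [this]

-- With a nonpositive rem the branch never fires (indices stay ≥ i ≥ 0).
theorem pv_mk_nonpos (per rem rem' i : Int) (h : rem ≤ 0) (h' : rem' ≤ 0) (hi : 0 ≤ i)
    (l : List Int) : pvMk per rem i l = pvMk per rem' i l := by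
  induction l generalizing i with
  | nil => rfl
  | cons x rest ih =>
      simp only [pvMk]
      rw [if_neg (by omega), if_neg (by omega), ih _ (by omega)]

-- Head-cons form of B's greedy loop body (proof-side helper).
def pvGo (remaining left : Int) : List Int → List (List (String × Int))
  | [] => []
  | x :: rest =>
      let share := -(PySem.Int.floordiv (-remaining) left)
      [("user_id", x), ("amount_cents", share)] :: pvGo (remaining - share) (left - 1) rest

-- B's foldl with (splits, remaining, left) state produces acc ++ pvGo.
theorem pv_foldl_go (ids : List Int) : ∀ (acc : List (List (String × Int))) (remaining left : Int),
    (ids.foldl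
      (fun (st : List (List (String × Int)) × Int × Int) user_id =>
        let share := -(PySem.Int.floordiv (-st.2.1) st.2.2)
        (st.1 ++ [[("user_id", user_id), ("amount_cents", share)]],
         st.2.1 - share, st.2.2 - 1))
      (acc, remaining, left)).1 = acc ++ pvGo remaining left ids := by
  induction ids with
  | nil => intro acc remaining left; simp [pvGo]
  | cons x rest ih =>
      intro acc remaining left
      simp only [List.foldl, pvGo, ih]
      simp

-- B's greedy loop computes pvMk from a (per, rem) decomposition of the amount.
theorem pv_go_mk : ∀ (ids : List Int) (per rem : Int), 0 ≤ rem → rem ≤ (ids.length : Int) →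
    pvGo (per * (ids.length : Int) + rem) (ids.length : Int) ids = pvMk per rem 0 ids := by
  intro ids
  induction ids with
  | nil => intro per rem _ _; rfl
  | cons x rest ih =>
      intro per rem h0 h1
      have hk : (0:Int) < ((x :: rest).length : Int) := by simp
      set k : Int := ((x :: rest).length : Int) with hkdef
      have hrest : ((rest.length : Int)) = k - 1 := by simp [hkdef]
      by_cases hr : 0 < rem
      · -- head takes per + 1
        have hshare : -(PySem.Int.floordiv (-(per * k + rem)) k) = per + 1 := by
          rw [PySem.Int.neg_floordiv_neg_eq_iff_of_pos hk]
          constructor <;> nlinarith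
        have hrec : per * k + rem - (per + 1) = per * (rest.length : Int) + (rem - 1) := by
          rw [hrest]; ring
        have hleft : k - 1 = (rest.length : Int) := by omega
        simp only [pvGo, pvMk]
        rw [hshare, hrec, hleft, ih per (rem - 1) (by omega) (by omega), if_pos hr,
            pv_mk_shift]
      · -- rem = 0: head takes exactly per
        have hrem : rem = 0 := by omega
        subst hrem
        have hshare : -(PySem.Int.floordiv (-(per * k + 0)) k) = per := by
          rw [PySem.Int.neg_floordiv_neg_eq_iff_of_pos hk]
          constructor <;> nlinarith
        have hrec : per * k + 0 - per = per * (rest.length : Int) + 0 := by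
          rw [hrest]; ring
        have hleft : k - 1 = (rest.length : Int) := by omega
        simp only [pvGo, pvMk]
        rw [hshare, hrec, hleft, ih per 0 le_rfl (by positivity), if_neg (by omega),
            pv_mk_shift]
        norm_num
        exact pv_mk_nonpos per 0 (-1) 0 le_rfl (by omega) le_rfl rest

-- ===== VERDICT (by name: the statement is the Claim_ definition above) =====
theorem calculate_equal_splits_spec : Claim_equal_calculate_equal_splits := by
  intro A ids _ hne
  unfold Spec_calculate_equal_splits calculate_equal_splits calculate_equal_splits_alt
  simp only [if_neg hne]
  rw [pv_foldl_append_map]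
  simp only [List.nil_append]
  have hn : (0:Int) < (ids.length : Int) := by
    cases ids with | nil => exact absurd rfl hne | cons a l => simp
  have hA := PySem.Int.floordiv_mul_add_mod A (ids.length : Int)
  rw [pv_A_mk, pv_foldl_go, List.nil_append,
      ← pv_go_mk ids _ _ (PySem.Int.mod_nonneg A hn) (le_of_lt (PySem.Int.mod_lt A hn)), hA]
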